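-- pv_equiv track=rewrite | github.com/tonghien22890/sam_trainer | scripts/generate_improved_training_data.py | find_combos_in_hand
-- ===== SOURCE A (Python) =====
-- from typing import List, Dict, Any, Tuple
-- from collections import defaultdict
--
-- def get_card_rank(card_id: int) -> int:
--     """Get rank of a card (0-12, where 0=Ace, 12=King)"""
--     return card_id % 13
--
-- def find_combos_in_hand(hand: List[int]) -> Dict[str, List[List[int]]]:
--     """Find all possible combos in a hand"""
--     combos = {
--         "single": [],
--         "pair": [],
--         "triple": [],
--         "four_kind": [],
--         "straight": [],
--         "double_seq": []
--     }
--
--     # Count ranks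
--     rank_counts = defaultdict(list)
--     for card_id in hand:
--         rank = get_card_rank(card_id)
--         rank_counts[rank].append(card_id)
--
--     # Find singles, pairs, triples, four_kinds
--     for rank, cards in rank_counts.items():
--         if len(cards) >= 1:
--             combos["single"].append([cards[0]])
--         if len(cards) >= 2:
--             combos["pair"].append(cards[:2])
--         if len(cards) >= 3:
--             combos["triple"].append(cards[:3])
--         if len(cards) >= 4:
--             combos["four_kind"].append(cards[:4])
--
--     # Find straights (5+ consecutive cards)
--     ranks = sorted(rank_counts.keys())
--     for i in range(len(ranks) - 4):
--         if ranks[i+4] - ranks[i] == 4:  # 5 consecutive ranks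
--             straight_cards = []
--             for rank in ranks[i:i+5]:
--                 straight_cards.append(rank_counts[rank][0])
--             combos["straight"].append(straight_cards)
--
--     # Find double sequences (2+ consecutive pairs)
--     for i in range(len(ranks) - 1):
--         if ranks[i+1] - ranks[i] == 1 and len(rank_counts[ranks[i]]) >= 2 and len(rank_counts[ranks[i+1]]) >= 2:
--             double_seq_cards = rank_counts[ranks[i]][:2] + rank_counts[ranks[i+1]][:2]
--             combos["double_seq"].append(double_seq_cards)
--
--     return combos
-- ===== SOURCE B (Python) =====
-- def find_combos_in_hand(hand):
--     """Find all possible combos in a hand.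
--
--     Alternative: groups are built by recursive partition on the first card's rank
--     (instead of a dict-accumulation pass), and straights / double sequences come
--     from decomposing the sorted ranks into maximal consecutive runs (instead of
--     sliding windows over the sorted rank list)."""
--
--     def group(cards):
--         if not cards:
--             return []
--         r = cards[0] % 13
--         return [(r, [c for c in cards if c % 13 == r])] + \
--             group([c for c in cards if c % 13 != r])
--
--     def split_run(prev, ranks):
--         if not ranks or ranks[0] != prev + 1:
--             return [], ranks
--         run, rest = split_run(ranks[0], ranks[1:])
--         return [ranks[0]] + run, rest
--
--     def runs_of(ranks):
--         if not ranks: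
--             return []
--         run, rest = split_run(ranks[0], ranks[1:])
--         return [[ranks[0]] + run] + runs_of(rest)
--
--     groups = group(hand)
--     by_rank = dict(groups)
--     runs = runs_of(sorted(by_rank))
--     return {
--         "single": [[cards[0]] for _, cards in groups],
--         "pair": [cards[:2] for _, cards in groups if len(cards) >= 2],
--         "triple": [cards[:3] for _, cards in groups if len(cards) >= 3],
--         "four_kind": [cards[:4] for _, cards in groups if len(cards) >= 4],
--         "straight": [[by_rank[run[i + k]][0] for k in range(5)]
--                      for run in runs for i in range(len(run) - 4)],
--         "double_seq": [by_rank[run[i]][:2] + by_rank[run[i + 1]][:2]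
--                        for run in runs for i in range(len(run) - 1)
--                        if len(by_rank[run[i]]) >= 2 and len(by_rank[run[i + 1]]) >= 2],
--     }
-- ===== Notes on version B (the rewrite author's own statement) =====
-- stated objective: alternative
-- what changed: Grouping by rank is done by recursive partition on the first card's rank (extract-all-equal, recurse on the remainder) instead of a dict-accumulation pass, and straights/double sequences are found by decomposing the sorted ranks into maximal consecutive runs and enumerating window starts inside each run, instead of sliding a width-5 (resp. width-2) window over the whole sorted rank list.
import Mathlib
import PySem

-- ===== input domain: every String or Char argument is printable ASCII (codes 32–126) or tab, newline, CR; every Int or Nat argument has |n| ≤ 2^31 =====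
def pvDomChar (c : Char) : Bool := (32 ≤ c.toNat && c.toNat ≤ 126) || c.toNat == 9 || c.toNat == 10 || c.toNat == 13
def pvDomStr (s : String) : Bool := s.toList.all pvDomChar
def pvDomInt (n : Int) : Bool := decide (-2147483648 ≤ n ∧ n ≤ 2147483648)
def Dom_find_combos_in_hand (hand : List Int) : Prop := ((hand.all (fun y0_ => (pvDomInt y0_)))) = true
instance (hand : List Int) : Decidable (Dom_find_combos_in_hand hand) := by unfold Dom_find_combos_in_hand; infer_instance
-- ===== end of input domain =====

-- B groups the hand by recursive partition on the first card's rank instead of a dict-accumulation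
-- pass, and finds straights/double sequences by decomposing the sorted ranks into maximal consecutive
-- runs and enumerating window starts inside each run, instead of sliding windows over the sorted
-- rank list (objective: alternative).

-- ===== PORT A =====
-- cards[0] / rank_counts[rank][0] are ported as pyGetD … 0 0: the indexed lists are always nonempty
-- (every value stored in rank_counts received at least one append), so the default is never used.
def find_combos_in_hand (hand : List Int) : List (String × List (List Int)) :=
  let combos : PySem.Dict String (List (List Int)) :=
    PySem.Dict.ofList [("single", []), ("pair", []), ("triple", []), ("four_kind", []), ("straight", []), ("double_seq", [])]
  let rank_counts : PySem.Dict Int (List Int) :=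
    hand.foldl (fun d card_id => d.modify (PySem.Int.mod card_id 13) [] (fun cs => cs ++ [card_id])) PySem.Dict.empty
  let combos := rank_counts.items.foldl (fun c p =>
      let cards := p.2
      let c := if 1 ≤ cards.length then c.modify "single" [] (fun l => l ++ [[PySem.List.pyGetD cards 0 0]]) else c
      let c := if 2 ≤ cards.length then c.modify "pair" [] (fun l => l ++ [PySem.List.slice cards none (some 2)]) else c
      let c := if 3 ≤ cards.length then c.modify "triple" [] (fun l => l ++ [PySem.List.slice cards none (some 3)]) else c
      let c := if 4 ≤ cards.length then c.modify "four_kind" [] (fun l => l ++ [PySem.List.slice cards none (some 4)]) else c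
      c) combos
  let ranks := PySem.List.sorted rank_counts.keys (fun x => x) false
  let combos := (PySem.List.pyRange 0 ((ranks.length : Int) - 4) 1).foldl (fun c i =>
      if PySem.List.pyGetD ranks (i + 4) 0 - PySem.List.pyGetD ranks i 0 == 4 then
        let straight_cards := (PySem.List.slice ranks (some i) (some (i + 5))).foldl
            (fun acc rank => acc ++ [PySem.List.pyGetD (rank_counts.getD rank []) 0 0]) []
        c.modify "straight" [] (fun l => l ++ [straight_cards])
      else c) combos
  let combos := (PySem.List.pyRange 0 ((ranks.length : Int) - 1) 1).foldl (fun c i =>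
      if (PySem.List.pyGetD ranks (i + 1) 0 - PySem.List.pyGetD ranks i 0 == 1
            && decide (2 ≤ (rank_counts.getD (PySem.List.pyGetD ranks i 0) []).length)
            && decide (2 ≤ (rank_counts.getD (PySem.List.pyGetD ranks (i + 1) 0) []).length)) then
        c.modify "double_seq" [] (fun l =>
          l ++ [PySem.List.slice (rank_counts.getD (PySem.List.pyGetD ranks i 0) []) none (some 2)
                ++ PySem.List.slice (rank_counts.getD (PySem.List.pyGetD ranks (i + 1) 0) []) none (some 2)])
      else c) combos
  combos.items

-- ===== PORT B =====
/-- `group(cards)` of Source B: recursive partition on the first card's rank. -/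
def groupB : List Int → List (Int × List Int)
  | [] => []
  | c :: t =>
    let r := PySem.Int.mod c 13
    (r, (c :: t).filter (fun x => PySem.Int.mod x 13 == r)) ::
      groupB ((c :: t).filter (fun x => !(PySem.Int.mod x 13 == r)))
  termination_by l => l.length
  decreasing_by
    simp only [List.filter_cons, beq_self_eq_true, Bool.not_true, Bool.false_eq_true, if_false]
    exact Nat.lt_succ_of_le (List.length_filter_le _ _)

/-- `split_run(prev, ranks)` of Source B: maximal consecutive prefix and the remainder. -/
def splitRun : Int → List Int → List Int × List Int
  | _, [] => ([], [])
  | prev, x :: t =>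
    if x == prev + 1 then
      let p := splitRun x t
      (x :: p.1, p.2)
    else ([], x :: t)

-- termination helper for runsOf (cited by its decreasing_by)
theorem splitRun_snd_length (p : Int) (t : List Int) : (splitRun p t).2.length ≤ t.length := by
  induction t generalizing p with
  | nil => simp [splitRun]
  | cons x t ih =>
    simp only [splitRun]
    split
    · exact le_trans (ih x) (Nat.le_succ _)
    · simp

/-- `runs_of(ranks)` of Source B: decomposition into maximal consecutive runs. -/
def runsOf : List Int → List (List Int)
  | [] => []
  | r :: t => (r :: (splitRun r t).1) :: runsOf (splitRun r t).2
  termination_by l => l.length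
  decreasing_by simpa using Nat.lt_succ_of_le (splitRun_snd_length r t)

def find_combos_in_hand_alt (hand : List Int) : List (String × List (List Int)) :=
  let groups := groupB hand
  let by_rank : PySem.Dict Int (List Int) := PySem.Dict.ofList groups
  let runs := runsOf (PySem.List.sorted by_rank.keys (fun x => x) false)
  [("single", groups.map (fun p => [PySem.List.pyGetD p.2 0 0])),
   ("pair", (groups.filter (fun p => decide (2 ≤ p.2.length))).map (fun p => PySem.List.slice p.2 none (some 2))),
   ("triple", (groups.filter (fun p => decide (3 ≤ p.2.length))).map (fun p => PySem.List.slice p.2 none (some 3))),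
   ("four_kind", (groups.filter (fun p => decide (4 ≤ p.2.length))).map (fun p => PySem.List.slice p.2 none (some 4))),
   ("straight", runs.flatMap (fun run =>
      (PySem.List.pyRange 0 ((run.length : Int) - 4) 1).map (fun i =>
        (PySem.List.pyRange 0 5 1).map (fun k =>
          PySem.List.pyGetD (by_rank.getD (PySem.List.pyGetD run (i + k) 0) []) 0 0)))),
   ("double_seq", runs.flatMap (fun run =>
      ((PySem.List.pyRange 0 ((run.length : Int) - 1) 1).filter (fun i =>
          decide (2 ≤ (by_rank.getD (PySem.List.pyGetD run i 0) []).length)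
          && decide (2 ≤ (by_rank.getD (PySem.List.pyGetD run (i + 1) 0) []).length))).map (fun i =>
        PySem.List.slice (by_rank.getD (PySem.List.pyGetD run i 0) []) none (some 2)
        ++ PySem.List.slice (by_rank.getD (PySem.List.pyGetD run (i + 1) 0) []) none (some 2))))]

-- ===== PRECONDITION & SPEC =====
def Spec_find_combos_in_hand (hand : List Int) (out : List (String × List (List Int))) : Prop := out = find_combos_in_hand_alt hand
instance (hand : List Int) (out : List (String × List (List Int))) : Decidable (Spec_find_combos_in_hand hand out) := by unfold Spec_find_combos_in_hand; infer_instance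

-- ===== CLAIM (what is proved, stated in full; the proofs are below) =====
def Claim_equal_find_combos_in_hand : Prop := ∀ (hand : List Int), Dom_find_combos_in_hand hand → Spec_find_combos_in_hand hand (find_combos_in_hand hand)

-- ===== LEMMAS AND PROOFS =====

/-- The shared rank-grouping dict (A's `rank_counts`). -/
def rcD (hand : List Int) : PySem.Dict Int (List Int) :=
  hand.foldl (fun d card_id => d.modify (PySem.Int.mod card_id 13) [] (fun cs => cs ++ [card_id])) PySem.Dict.empty

/-- A dict over the six fixed combo keys. -/
def mkSix (a b c d e f : List (List Int)) : PySem.Dict String (List (List Int)) :=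
  PySem.Dict.mk [("single", a), ("pair", b), ("triple", c), ("four_kind", d), ("straight", e), ("double_seq", f)]

theorem rcD_getD (hand : List Int) (r : Int) :
    (rcD hand).getD r [] = hand.filter (fun c => PySem.Int.mod c 13 == r) := by
  have h1 : rcD hand = (hand.map (fun c => (PySem.Int.mod c 13, c))).foldl
      (fun d p => d.modify p.1 [] (fun cs => cs ++ [p.2])) PySem.Dict.empty := by
    rw [List.foldl_map]
    rfl
  rw [h1, PySem.Dict.getD_foldl_modify_append, PySem.Dict.getD_empty, List.filter_map, List.map_map]
  simp [Function.comp_def]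

theorem rcD_keys (hand : List Int) :
    (rcD hand).keys = PySem.Set.ofList (hand.map (fun c => PySem.Int.mod c 13)) := by
  rw [show (rcD hand).keys = (hand.foldl (fun d x => d.modify ((fun c => PySem.Int.mod c 13) x) []
        ((fun (_ : PySem.Dict Int (List Int)) (c : Int) (cs : List Int) => cs ++ [c]) d x)) PySem.Dict.empty).keys from rfl,
    PySem.Dict.keys_foldl_modify_key, PySem.Dict.keys_empty, PySem.Set.update_nil_left]

theorem rcD_nodup (hand : List Int) : (rcD hand).keys.Nodup := by
  rw [rcD_keys]; exact PySem.Set.nodup_ofList _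

theorem mem_rcD_keys (hand : List Int) (r : Int) :
    r ∈ (rcD hand).keys ↔ ∃ c ∈ hand, PySem.Int.mod c 13 = r := by
  rw [rcD_keys]
  simp [PySem.Set.mem_ofList, eq_comm]

theorem rcD_getD_ne_nil_iff (hand : List Int) (r : Int) :
    (rcD hand).getD r [] ≠ [] ↔ r ∈ (rcD hand).keys := by
  rw [rcD_getD, mem_rcD_keys]
  rw [Ne, List.filter_eq_nil_iff.not]
  push Not
  simp

def ranksD (hand : List Int) : List Int := PySem.List.sorted (rcD hand).keys (fun x => x) false

theorem mkSix_items (a b c d e f : List (List Int)) :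
    (mkSix a b c d e f).items = [("single", a), ("pair", b), ("triple", c), ("four_kind", d), ("straight", e), ("double_seq", f)] := rfl

theorem stepI_eq (a b c d e f : List (List Int)) (p : Int × List Int) :
    (fun (c : PySem.Dict String (List (List Int))) (p : Int × List Int) =>
      let cards := p.2
      let c := if 1 ≤ cards.length then c.modify "single" [] (fun l => l ++ [[PySem.List.pyGetD cards 0 0]]) else c
      let c := if 2 ≤ cards.length then c.modify "pair" [] (fun l => l ++ [PySem.List.slice cards none (some 2)]) else c
      let c := if 3 ≤ cards.length then c.modify "triple" [] (fun l => l ++ [PySem.List.slice cards none (some 3)]) else c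
      let c := if 4 ≤ cards.length then c.modify "four_kind" [] (fun l => l ++ [PySem.List.slice cards none (some 4)]) else c
      c) (mkSix a b c d e f) p
    = mkSix
      (if 1 ≤ p.2.length then a ++ [[PySem.List.pyGetD p.2 0 0]] else a)
      (if 2 ≤ p.2.length then b ++ [PySem.List.slice p.2 none (some 2)] else b)
      (if 3 ≤ p.2.length then c ++ [PySem.List.slice p.2 none (some 3)] else c)
      (if 4 ≤ p.2.length then d ++ [PySem.List.slice p.2 none (some 4)] else d)
      e f := by
  dsimp only
  split_ifs <;> rfl

theorem foldI (ps : List (Int × List Int)) (a b c d e f : List (List Int)) :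
    ps.foldl (fun c p =>
      let cards := p.2
      let c := if 1 ≤ cards.length then c.modify "single" [] (fun l => l ++ [[PySem.List.pyGetD cards 0 0]]) else c
      let c := if 2 ≤ cards.length then c.modify "pair" [] (fun l => l ++ [PySem.List.slice cards none (some 2)]) else c
      let c := if 3 ≤ cards.length then c.modify "triple" [] (fun l => l ++ [PySem.List.slice cards none (some 3)]) else c
      let c := if 4 ≤ cards.length then c.modify "four_kind" [] (fun l => l ++ [PySem.List.slice cards none (some 4)]) else c
      c) (mkSix a b c d e f)
    = mkSix
      (a ++ (ps.filter (fun p => decide (1 ≤ p.2.length))).map (fun p => [PySem.List.pyGetD p.2 0 0]))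
      (b ++ (ps.filter (fun p => decide (2 ≤ p.2.length))).map (fun p => PySem.List.slice p.2 none (some 2)))
      (c ++ (ps.filter (fun p => decide (3 ≤ p.2.length))).map (fun p => PySem.List.slice p.2 none (some 3)))
      (d ++ (ps.filter (fun p => decide (4 ≤ p.2.length))).map (fun p => PySem.List.slice p.2 none (some 4)))
      e f := by
  induction ps generalizing a b c d with
  | nil => simp
  | cons p t ih =>
    simp only [List.foldl_cons, stepI_eq, ih]
    by_cases h1 : 1 ≤ p.2.length <;> by_cases h2 : 2 ≤ p.2.length <;>
      by_cases h3 : 3 ≤ p.2.length <;> by_cases h4 : 4 ≤ p.2.length <;>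
      simp [mkSix, h1, h2, h3, h4]

theorem foldS (rc : PySem.Dict Int (List Int)) (ranks : List Int) (is : List Int) (a b c d e f : List (List Int)) :
    is.foldl (fun c i =>
      if PySem.List.pyGetD ranks (i + 4) 0 - PySem.List.pyGetD ranks i 0 == 4 then
        let straight_cards := (PySem.List.slice ranks (some i) (some (i + 5))).foldl
            (fun acc rank => acc ++ [PySem.List.pyGetD (rc.getD rank []) 0 0]) []
        c.modify "straight" [] (fun l => l ++ [straight_cards])
      else c) (mkSix a b c d e f)
    = mkSix a b c d
      (e ++ (is.filter (fun i => PySem.List.pyGetD ranks (i + 4) 0 - PySem.List.pyGetD ranks i 0 == 4)).map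
        (fun i => (PySem.List.slice ranks (some i) (some (i + 5))).foldl
            (fun acc rank => acc ++ [PySem.List.pyGetD (rc.getD rank []) 0 0]) [])) f := by
  induction is generalizing e with
  | nil => simp
  | cons i t ih =>
    simp only [List.foldl_cons]
    by_cases h : PySem.List.pyGetD ranks (i + 4) 0 - PySem.List.pyGetD ranks i 0 == 4
    · rw [show (mkSix a b c d e f).modify "straight" [] (fun l => l ++ [(PySem.List.slice ranks (some i) (some (i + 5))).foldl
            (fun acc rank => acc ++ [PySem.List.pyGetD (rc.getD rank []) 0 0]) []])
          = mkSix a b c d (e ++ [(PySem.List.slice ranks (some i) (some (i + 5))).foldl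
            (fun acc rank => acc ++ [PySem.List.pyGetD (rc.getD rank []) 0 0]) []]) f from rfl] at *
      simp only [h, if_true, ih]
      simp [mkSix, h]
    · rw [Bool.not_eq_true] at h
      simp only [h, Bool.false_eq_true, if_false, ih]
      simp [h]

theorem foldD (rc : PySem.Dict Int (List Int)) (ranks : List Int) (is : List Int) (a b c d e f : List (List Int)) :
    is.foldl (fun c i =>
      if (PySem.List.pyGetD ranks (i + 1) 0 - PySem.List.pyGetD ranks i 0 == 1
            && decide (2 ≤ (rc.getD (PySem.List.pyGetD ranks i 0) []).length)
            && decide (2 ≤ (rc.getD (PySem.List.pyGetD ranks (i + 1) 0) []).length)) then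
        c.modify "double_seq" [] (fun l =>
          l ++ [PySem.List.slice (rc.getD (PySem.List.pyGetD ranks i 0) []) none (some 2)
                ++ PySem.List.slice (rc.getD (PySem.List.pyGetD ranks (i + 1) 0) []) none (some 2)])
      else c) (mkSix a b c d e f)
    = mkSix a b c d e
      (f ++ (is.filter (fun i => PySem.List.pyGetD ranks (i + 1) 0 - PySem.List.pyGetD ranks i 0 == 1
            && decide (2 ≤ (rc.getD (PySem.List.pyGetD ranks i 0) []).length)
            && decide (2 ≤ (rc.getD (PySem.List.pyGetD ranks (i + 1) 0) []).length))).map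
        (fun i => PySem.List.slice (rc.getD (PySem.List.pyGetD ranks i 0) []) none (some 2)
                ++ PySem.List.slice (rc.getD (PySem.List.pyGetD ranks (i + 1) 0) []) none (some 2))) := by
  induction is generalizing f with
  | nil => simp
  | cons i t ih =>
    simp only [List.foldl_cons]
    by_cases h : (PySem.List.pyGetD ranks (i + 1) 0 - PySem.List.pyGetD ranks i 0 == 1
            && decide (2 ≤ (rc.getD (PySem.List.pyGetD ranks i 0) []).length)
            && decide (2 ≤ (rc.getD (PySem.List.pyGetD ranks (i + 1) 0) []).length)) = true
    · rw [show (mkSix a b c d e f).modify "double_seq" [] (fun l =>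
            l ++ [PySem.List.slice (rc.getD (PySem.List.pyGetD ranks i 0) []) none (some 2)
                  ++ PySem.List.slice (rc.getD (PySem.List.pyGetD ranks (i + 1) 0) []) none (some 2)])
          = mkSix a b c d e (f ++ [PySem.List.slice (rc.getD (PySem.List.pyGetD ranks i 0) []) none (some 2)
                  ++ PySem.List.slice (rc.getD (PySem.List.pyGetD ranks (i + 1) 0) []) none (some 2)]) from rfl] at *
      simp only [h, if_true, ih]
      simp [mkSix, h]
    · rw [Bool.not_eq_true] at h
      simp only [h, Bool.false_eq_true, if_false, ih]
      simp [h]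

theorem portA_eq (hand : List Int) :
    find_combos_in_hand hand = (mkSix
      (((rcD hand).items.filter (fun p => decide (1 ≤ p.2.length))).map (fun p => [PySem.List.pyGetD p.2 0 0]))
      (((rcD hand).items.filter (fun p => decide (2 ≤ p.2.length))).map (fun p => PySem.List.slice p.2 none (some 2)))
      (((rcD hand).items.filter (fun p => decide (3 ≤ p.2.length))).map (fun p => PySem.List.slice p.2 none (some 3)))
      (((rcD hand).items.filter (fun p => decide (4 ≤ p.2.length))).map (fun p => PySem.List.slice p.2 none (some 4)))
      (((PySem.List.pyRange 0 (((ranksD hand).length : Int) - 4) 1).filter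
          (fun i => PySem.List.pyGetD (ranksD hand) (i + 4) 0 - PySem.List.pyGetD (ranksD hand) i 0 == 4)).map
        (fun i => (PySem.List.slice (ranksD hand) (some i) (some (i + 5))).foldl
            (fun acc rank => acc ++ [PySem.List.pyGetD ((rcD hand).getD rank []) 0 0]) []))
      (((PySem.List.pyRange 0 (((ranksD hand).length : Int) - 1) 1).filter
          (fun i => PySem.List.pyGetD (ranksD hand) (i + 1) 0 - PySem.List.pyGetD (ranksD hand) i 0 == 1
            && decide (2 ≤ ((rcD hand).getD (PySem.List.pyGetD (ranksD hand) i 0) []).length)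
            && decide (2 ≤ ((rcD hand).getD (PySem.List.pyGetD (ranksD hand) (i + 1) 0) []).length))).map
        (fun i => PySem.List.slice ((rcD hand).getD (PySem.List.pyGetD (ranksD hand) i 0) []) none (some 2)
                ++ PySem.List.slice ((rcD hand).getD (PySem.List.pyGetD (ranksD hand) (i + 1) 0) []) none (some 2)))).items := by
  have h0 : find_combos_in_hand hand =
      ((PySem.List.pyRange 0 (((ranksD hand).length : Int) - 1) 1).foldl (fun c i =>
        if (PySem.List.pyGetD (ranksD hand) (i + 1) 0 - PySem.List.pyGetD (ranksD hand) i 0 == 1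
              && decide (2 ≤ ((rcD hand).getD (PySem.List.pyGetD (ranksD hand) i 0) []).length)
              && decide (2 ≤ ((rcD hand).getD (PySem.List.pyGetD (ranksD hand) (i + 1) 0) []).length)) then
          c.modify "double_seq" [] (fun l =>
            l ++ [PySem.List.slice ((rcD hand).getD (PySem.List.pyGetD (ranksD hand) i 0) []) none (some 2)
                  ++ PySem.List.slice ((rcD hand).getD (PySem.List.pyGetD (ranksD hand) (i + 1) 0) []) none (some 2)])
        else c)
        ((PySem.List.pyRange 0 (((ranksD hand).length : Int) - 4) 1).foldl (fun c i =>
          if PySem.List.pyGetD (ranksD hand) (i + 4) 0 - PySem.List.pyGetD (ranksD hand) i 0 == 4 then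
            let straight_cards := (PySem.List.slice (ranksD hand) (some i) (some (i + 5))).foldl
                (fun acc rank => acc ++ [PySem.List.pyGetD ((rcD hand).getD rank []) 0 0]) []
            c.modify "straight" [] (fun l => l ++ [straight_cards])
          else c)
          ((rcD hand).items.foldl (fun c p =>
            let cards := p.2
            let c := if 1 ≤ cards.length then c.modify "single" [] (fun l => l ++ [[PySem.List.pyGetD cards 0 0]]) else c
            let c := if 2 ≤ cards.length then c.modify "pair" [] (fun l => l ++ [PySem.List.slice cards none (some 2)]) else c
            let c := if 3 ≤ cards.length then c.modify "triple" [] (fun l => l ++ [PySem.List.slice cards none (some 3)]) else c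
            let c := if 4 ≤ cards.length then c.modify "four_kind" [] (fun l => l ++ [PySem.List.slice cards none (some 4)]) else c
            c) (mkSix [] [] [] [] [] [])))).items := rfl
  rw [h0, foldI, foldS, foldD]
  simp

theorem mono_getD_lt (R : List Int) (hinc : R.Pairwise (· < ·)) {i j : Nat} (hij : i < j)
    (hj : j < R.length) : R.getD i 0 < R.getD j 0 := by
  have hi : i < R.length := lt_trans hij hj
  rw [List.getD_eq_getElem R 0 hi, List.getD_eq_getElem R 0 hj]
  exact List.pairwise_iff_getElem.mp hinc i j hi hj hij

theorem mono_getD_le (R : List Int) (hinc : R.Pairwise (· < ·)) {i j : Nat} (hij : i ≤ j)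
    (hj : j < R.length) : R.getD i 0 ≤ R.getD j 0 := by
  rcases lt_or_eq_of_le hij with h | h
  · exact le_of_lt (mono_getD_lt R hinc h hj)
  · rw [h]

theorem inc_gap (R : List Int) (hinc : R.Pairwise (· < ·)) :
    ∀ (k i : Nat), i + k < R.length → R.getD i 0 + (k : Int) ≤ R.getD (i + k) 0 := by
  intro k
  induction k with
  | zero => intro i h; simp
  | succ k ih =>
    intro i h
    have h2 := ih i (by omega)
    have h3 : R.getD (i + k) 0 < R.getD (i + (k + 1)) 0 :=
      mono_getD_lt R hinc (by omega) (by omega)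
    push_cast
    push_cast at h2
    linarith

theorem mem_getD (R : List Int) (i : Nat) (h : i < R.length) : R.getD i 0 ∈ R := by
  rw [List.getD_eq_getElem R 0 h]; exact List.getElem_mem _

theorem idx_of_mem {R : List Int} {x : Int} (h : x ∈ R) :
    ∃ i, i < R.length ∧ R.getD i 0 = x := by
  rw [List.mem_iff_getElem] at h
  obtain ⟨i, hi, hx⟩ := h
  exact ⟨i, hi, by rw [List.getD_eq_getElem R 0 hi]; exact hx⟩

theorem window_all (R : List Int) (hinc : R.Pairwise (· < ·)) {i w : Nat} (h : i + w < R.length)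
    (hc : R.getD (i + w) 0 = R.getD i 0 + (w : Int)) :
    ∀ k : Nat, k ≤ w → R.getD (i + k) 0 = R.getD i 0 + (k : Int) := by
  intro k hk
  have h1 : R.getD i 0 + (k : Int) ≤ R.getD (i + k) 0 := inc_gap R hinc k i (by omega)
  have h2 : R.getD (i + k) 0 + ((w - k : Nat) : Int) ≤ R.getD (i + k + (w - k)) 0 :=
    inc_gap R hinc (w - k) (i + k) (by omega)
  have h3 : i + k + (w - k) = i + w := by omega
  rw [h3, hc] at h2
  have h4 : ((w - k : Nat) : Int) = (w : Int) - (k : Int) := by push_cast [Nat.cast_sub hk]; ring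
  rw [h4] at h2
  linarith

theorem exists_window (R : List Int) (hinc : R.Pairwise (· < ·)) :
    ∀ (w : Nat) (s : Int), (∀ k : Nat, k ≤ w → s + (k : Int) ∈ R) →
      ∃ i, i + w < R.length ∧ R.getD i 0 = s ∧ R.getD (i + w) 0 = s + (w : Int) := by
  intro w
  induction w with
  | zero =>
    intro s hmem
    obtain ⟨i, hi, hx⟩ := idx_of_mem (by simpa using hmem 0 le_rfl)
    exact ⟨i, by simpa using hi, hx, by simpa using hx⟩
  | succ w ih =>
    intro s hmem
    obtain ⟨i, hiw, hs, hsw⟩ := ih s (fun k hk => hmem k (by omega))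
    obtain ⟨j, hj, hjx⟩ := idx_of_mem (hmem (w + 1) le_rfl)
    have hlt : R.getD (i + w) 0 < R.getD j 0 := by
      rw [hsw, hjx]; push_cast; linarith
    have hij : i + w < j := by
      by_contra hcon
      have hle' : j ≤ i + w := by omega
      have := mono_getD_le R hinc hle' hiw
      linarith
    have hlen : i + (w + 1) < R.length := by omega
    have hgt : R.getD (i + w) 0 < R.getD (i + (w + 1)) 0 :=
      mono_getD_lt R hinc (by omega) (by omega)
    have hle : R.getD (i + (w + 1)) 0 ≤ R.getD j 0 := mono_getD_le R hinc (by omega) (by omega)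
    refine ⟨i, hlen, hs, ?_⟩
    rw [hjx] at hle
    rw [hsw] at hgt
    push_cast
    push_cast at hgt hle
    linarith

theorem mono_eq_of_mem : ∀ (l1 l2 : List Int), l1.Pairwise (· < ·) → l2.Pairwise (· < ·) →
    (∀ x, x ∈ l1 ↔ x ∈ l2) → l1 = l2 := by
  intro l1
  induction l1 with
  | nil =>
    intro l2 _ _ h
    cases l2 with
    | nil => rfl
    | cons b t2 => exact absurd ((h b).mpr (List.mem_cons_self)) (List.not_mem_nil)
  | cons a t1 ih =>
    intro l2 h1 h2 h
    cases l2 with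
    | nil => exact absurd ((h a).mp (List.mem_cons_self)) (List.not_mem_nil)
    | cons b t2 =>
      have hab : a = b := by
        rcases List.mem_cons.mp ((h a).mp List.mem_cons_self) with h' | h'
        · exact h'
        · rcases List.mem_cons.mp ((h b).mpr List.mem_cons_self) with h'' | h''
          · exact h''.symm
          · have hba : b < a := (List.pairwise_cons.mp h2).1 a h'
            have hab : a < b := (List.pairwise_cons.mp h1).1 b h''
            linarith
      subst hab
      have ht : ∀ x, x ∈ t1 ↔ x ∈ t2 := by
        intro x
        constructor
        · intro hx
          have hax : a < x := (List.pairwise_cons.mp h1).1 x hx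
          rcases List.mem_cons.mp ((h x).mp (List.mem_cons_of_mem a hx)) with h' | h'
          · subst h'; exact absurd hax (lt_irrefl x)
          · exact h'
        · intro hx
          have hax : a < x := (List.pairwise_cons.mp h2).1 x hx
          rcases List.mem_cons.mp ((h x).mpr (List.mem_cons_of_mem a hx)) with h' | h'
          · subst h'; exact absurd hax (lt_irrefl x)
          · exact h'
      rw [ih t2 (List.pairwise_cons.mp h1).2 (List.pairwise_cons.mp h2).2 ht]

theorem ranksD_pairwise (hand : List Int) : (ranksD hand).Pairwise (· < ·) := by
  rw [ranksD, rcD_keys]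
  exact PySem.List.sorted_ofList_pairwise_lt _

theorem mem_ranksD (hand : List Int) (r : Int) : r ∈ ranksD hand ↔ r ∈ (rcD hand).keys :=
  PySem.List.mem_sorted _ _ _ _

theorem pyGetD_cast (R : List Int) (i : Nat) : PySem.List.pyGetD R (i : Int) 0 = R.getD i 0 :=
  PySem.List.pyGetD_natCast R i 0

theorem pyGetD_cast4 (R : List Int) (i : Nat) : PySem.List.pyGetD R ((i : Int) + 4) 0 = R.getD (i + 4) 0 := by
  rw [show ((i : Int) + 4) = ((i + 4 : Nat) : Int) by push_cast; ring, PySem.List.pyGetD_natCast]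

theorem pyGetD_cast1 (R : List Int) (i : Nat) : PySem.List.pyGetD R ((i : Int) + 1) 0 = R.getD (i + 1) 0 := by
  rw [show ((i : Int) + 1) = ((i + 1 : Nat) : Int) by push_cast; ring, PySem.List.pyGetD_natCast]

theorem pyRange05 : PySem.List.pyRange 0 5 1 = [0, 1, 2, 3, 4] := by decide

theorem mem_keys_of_count2 (hand : List Int) (r : Int)
    (h : 2 ≤ ((rcD hand).getD r []).length) : r ∈ (rcD hand).keys := by
  rw [← rcD_getD_ne_nil_iff]
  intro hnil
  rw [hnil] at h
  simp at h

theorem range_cast_eq (b : Int) :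
    PySem.List.pyRange 0 b 1 = (List.range b.toNat).map (fun i : Nat => (i : Int)) := by
  rw [PySem.List.pyRange_one]
  simp

-- ---- B-side: the recursive grouping equals the dict grouping ----

theorem mod13_eq (c : Int) : PySem.Int.mod c 13 = c % 13 := by
  simp [PySem.Int.mod, Int.fmod_eq_emod]

theorem discard_ofList (l : List Int) (x : Int) :
    PySem.Set.discard (PySem.Set.ofList l) x = PySem.Set.ofList (l.filter (fun y => !(y == x))) := by
  induction l with
  | nil => rfl
  | cons a l ih =>
    rw [PySem.Set.ofList_cons, List.filter_cons]
    by_cases h : a = x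
    · subst h
      simp only [beq_self_eq_true, Bool.not_true, Bool.false_eq_true, if_false]
      rw [← ih]
      simp [PySem.Set.discard, List.filter_filter]
    · have hb : (!(a == x)) = true := by simp [h]
      rw [hb, if_pos rfl, PySem.Set.ofList_cons, ← ih]
      simp only [PySem.Set.discard, List.filter_cons, hb, if_true]
      rw [List.filter_filter, List.filter_filter]
      exact congrArg (a :: ·) (List.filter_congr (fun y _ => Bool.and_comm _ _))

theorem groupB_eq_aux (n : Nat) : ∀ (hand : List Int), hand.length ≤ n →
    groupB hand = (PySem.Set.ofList (hand.map (fun x => PySem.Int.mod x 13))).map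
      (fun k => (k, hand.filter (fun x => PySem.Int.mod x 13 == k))) := by
  induction n with
  | zero =>
    intro hand h
    rw [List.length_eq_zero_iff.mp (Nat.le_zero.mp h), groupB]
    rfl
  | succ n ih =>
    intro hand h
    match hand with
    | [] => rw [groupB]; rfl
    | c :: t =>
      rw [groupB]
      have hrest : ((c :: t).filter (fun x => !(PySem.Int.mod x 13 == PySem.Int.mod c 13)))
          = t.filter (fun x => !(PySem.Int.mod x 13 == PySem.Int.mod c 13)) := by
        simp
      have hlen : (t.filter (fun x => !(PySem.Int.mod x 13 == PySem.Int.mod c 13))).length ≤ n :=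
        le_trans (List.length_filter_le _ t) (Nat.le_of_succ_le_succ h)
      rw [hrest, ih _ hlen]
      rw [List.map_cons, PySem.Set.ofList_cons, discard_ofList, List.map_cons]
      refine List.cons_eq_cons.mpr ⟨?_, ?_⟩
      · simp
      · have hfm : (List.map (fun x => PySem.Int.mod x 13) t).filter (fun y => !(y == PySem.Int.mod c 13))
            = List.map (fun x => PySem.Int.mod x 13) (t.filter (fun x => !(PySem.Int.mod x 13 == PySem.Int.mod c 13))) := by
          rw [List.filter_map]; rfl
        rw [hfm]
        apply List.map_congr_left
        intro k hk
        have hkne : k ≠ PySem.Int.mod c 13 := by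
          obtain ⟨x, hx, hfx⟩ := List.mem_map.mp ((PySem.Set.mem_ofList _ _).mp hk)
          subst hfx
          simpa using (List.mem_filter.mp hx).2
        rw [mod13_eq] at hkne
        have hck : (PySem.Int.mod c 13 == k) = false := by
          rw [mod13_eq]
          simpa using fun hcon => hkne (Eq.symm hcon)
        have h1 : (c :: t).filter (fun x => PySem.Int.mod x 13 == k)
            = t.filter (fun x => PySem.Int.mod x 13 == k) := by
          simp only [List.filter_cons, hck, Bool.false_eq_true, if_false]
        congr 1
        rw [h1, List.filter_filter]
        apply List.filter_congr
        intro x _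
        rw [mod13_eq x, mod13_eq c]
        by_cases hx : x % 13 = k
        · simp [hx, fun hcon : k = c % 13 => hkne hcon]
        · simp [hx]

theorem groupB_eq (hand : List Int) :
    groupB hand = (PySem.Set.ofList (hand.map (fun x => PySem.Int.mod x 13))).map
      (fun k => (k, hand.filter (fun x => PySem.Int.mod x 13 == k))) :=
  groupB_eq_aux hand.length hand le_rfl

theorem groupB_items (hand : List Int) : groupB hand = (rcD hand).items := by
  rw [groupB_eq, PySem.Dict.items_eq_map_keys _ (rcD_nodup hand) [], rcD_keys]
  apply List.map_congr_left
  intro k _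
  rw [rcD_getD]

theorem dict_ext (d e : PySem.Dict Int (List Int)) (h : d.items = e.items) : d = e := by
  cases d; cases e; cases h; rfl

theorem ofList_groupB (hand : List Int) : PySem.Dict.ofList (groupB hand) = rcD hand := by
  apply dict_ext
  have hnodup : ((rcD hand).items.map Prod.fst).Nodup := by
    have : (rcD hand).items.map Prod.fst = (rcD hand).keys := rfl
    rw [this]; exact rcD_nodup hand
  have h1 : (PySem.Dict.ofList (rcD hand).items).items = (rcD hand).items := by
    have := PySem.Dict.items_foldl_insert_fresh (rcD hand).items Prod.fst Prod.snd PySem.Dict.empty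
      (fun a _ => rfl) hnodup
    simpa [PySem.Dict.ofList, PySem.Dict.update] using this
  rw [groupB_items, h1]

-- ---- B-side: structure of the run decomposition ----

theorem splitRun_append (p : Int) (t : List Int) : (splitRun p t).1 ++ (splitRun p t).2 = t := by
  induction t generalizing p with
  | nil => simp [splitRun]
  | cons x t ih =>
    simp only [splitRun]
    split
    · simpa using ih x
    · simp

theorem splitRun_fst_getD (p : Int) (t : List Int) :
    ∀ j, j < (splitRun p t).1.length → (splitRun p t).1.getD j 0 = p + 1 + j := by
  induction t generalizing p with
  | nil => simp [splitRun]
  | cons x t ih =>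
    simp only [splitRun]
    split
    · rename_i hx
      intro j hj
      match j with
      | 0 => simp [show x = p + 1 by simpa using hx]
      | Nat.succ j =>
        simp only [List.length_cons] at hj
        rw [List.getD_cons_succ, ih x j (by omega), show x = p + 1 by simpa using hx]
        push_cast; ring
    · simp

theorem splitRun_stop (p : Int) (t : List Int) (h : Int) (t' : List Int)
    (heq : (splitRun p t).2 = h :: t') : h ≠ p + (splitRun p t).1.length + 1 := by
  induction t generalizing p with
  | nil => simp [splitRun] at heq
  | cons x t ih =>
    simp only [splitRun] at heq ⊢
    by_cases hx : x = p + 1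
    · rw [if_pos (by simpa using hx)] at heq
      rw [if_pos (by simpa using hx)]
      have := ih x heq
      simp only [List.length_cons] at *
      intro hcon
      exact this (by rw [hcon, hx]; push_cast; ring_nf)
    · rw [if_neg (by simpa using hx)] at heq
      rw [if_neg (by simpa using hx)]
      cases heq
      simpa using hx

theorem flatten_runsOf (R : List Int) : (runsOf R).flatten = R := by
  induction R using runsOf.induct with
  | case1 => simp [runsOf]
  | case2 r t ih =>
    rw [runsOf]
    simp only [List.flatten_cons, ih]
    rw [List.cons_append, splitRun_append]

theorem runsOf_nonnil (R : List Int) : ∀ run ∈ runsOf R, run ≠ [] := by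
  induction R using runsOf.induct with
  | case1 => simp [runsOf]
  | case2 r t ih =>
    rw [runsOf]
    intro run hrun
    rcases List.mem_cons.mp hrun with rfl | h
    · simp
    · exact ih run h

theorem runsOf_consec (R : List Int) :
    ∀ run ∈ runsOf R, ∀ j, j < run.length → run.getD j 0 = run.getD 0 0 + j := by
  induction R using runsOf.induct with
  | case1 => simp [runsOf]
  | case2 r t ih =>
    rw [runsOf]
    intro run hrun
    rcases List.mem_cons.mp hrun with rfl | h
    · intro j hj
      match j with
      | 0 => simp
      | Nat.succ j =>
        simp only [List.length_cons] at hj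
        rw [List.getD_cons_succ, splitRun_fst_getD r t j (by omega)]
        simp
        ring
    · exact ih run h

theorem runsOf_subset (R : List Int) : ∀ run ∈ runsOf R, ∀ x ∈ run, x ∈ R := by
  intro run hrun x hx
  rw [← flatten_runsOf R]
  exact List.mem_flatten.mpr ⟨run, hrun, hx⟩

theorem runsOf_max (R : List Int) (hpw : R.Pairwise (· < ·)) :
    ∀ run ∈ runsOf R, (run.getD 0 0 + run.length : Int) ∉ R := by
  induction R using runsOf.induct with
  | case1 => simp [runsOf]
  | case2 r t ih =>
    have hsp := splitRun_append r t
    have ht_pw : t.Pairwise (· < ·) := (List.pairwise_cons.mp hpw).2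
    have hrt : ∀ y ∈ t, r < y := (List.pairwise_cons.mp hpw).1
    have hap : (((splitRun r t).1 ++ (splitRun r t).2).Pairwise (· < ·)) := by rw [hsp]; exact ht_pw
    have hcross : ∀ x ∈ (splitRun r t).1, ∀ y ∈ (splitRun r t).2, x < y :=
      (List.pairwise_append.mp hap).2.2
    have hrest_pw : (splitRun r t).2.Pairwise (· < ·) := (List.pairwise_append.mp hap).2.1
    rw [runsOf]
    intro run hrun
    rcases List.mem_cons.mp hrun with rfl | h
    · -- run = r :: srun
      intro hM
      have hM' : ((r :: (splitRun r t).1).getD 0 0 + ((r :: (splitRun r t).1).length : Int))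
          = r + ((splitRun r t).1.length : Int) + 1 := by
        simp
        ring
      rw [hM'] at hM
      rcases List.mem_cons.mp hM with hie | hit
      · omega
      · have hit2 : r + ((splitRun r t).1.length : Int) + 1 ∈ (splitRun r t).1 ++ (splitRun r t).2 := by
          rw [hsp]; exact hit
        rcases List.mem_append.mp hit2 with hin | hin
        · obtain ⟨j, hj, hjx⟩ := idx_of_mem hin
          rw [splitRun_fst_getD r t j hj] at hjx
          omega
        · match hre : (splitRun r t).2 with
          | [] => rw [hre] at hin; simp at hin
          | hh :: t' =>
            rw [hre] at hin
            have hstop := splitRun_stop r t hh t' hre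
            have hhgt : r + ((splitRun r t).1.length : Int) < hh := by
              rcases Nat.eq_zero_or_pos (splitRun r t).1.length with hz | hpos
              · have h1 : hh ∈ t := by rw [← hsp, hre]; exact List.mem_append.mpr (Or.inr List.mem_cons_self)
                have := hrt hh h1
                omega
              · have hj : (splitRun r t).1.length - 1 < (splitRun r t).1.length := by omega
                have hlast := splitRun_fst_getD r t ((splitRun r t).1.length - 1) hj
                have hmem : (splitRun r t).1.getD ((splitRun r t).1.length - 1) 0 ∈ (splitRun r t).1 :=
                  mem_getD _ _ hj
                have := hcross _ hmem hh (by rw [hre]; exact List.mem_cons_self)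
                have hcast : (((splitRun r t).1.length - 1 : Nat) : Int) = ((splitRun r t).1.length : Int) - 1 := by
                  omega
                omega
            rcases List.mem_cons.mp hin with hie | hin'
            · omega
            · have := (List.pairwise_cons.mp (hre ▸ hrest_pw)).1 _ hin'
              omega
    · -- run in runsOf rest
      intro hM
      have hM'nin := ih hrest_pw run h
      have hnonnil := runsOf_nonnil _ run h
      have hg0 : run.getD 0 0 ∈ run := mem_getD _ _ (by cases run; simp at hnonnil; simp)
      have hg0rest : run.getD 0 0 ∈ (splitRun r t).2 := runsOf_subset _ run h _ hg0
      have hlen : 1 ≤ run.length := by cases run; simp at hnonnil; simp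
      rcases List.mem_cons.mp hM with hie | hit
      · have := hrt _ (by rw [← hsp]; exact List.mem_append.mpr (Or.inr hg0rest))
        omega
      · have hit2 : run.getD 0 0 + (run.length : Int) ∈ (splitRun r t).1 ++ (splitRun r t).2 := by
          rw [hsp]; exact hit
        rcases List.mem_append.mp hit2 with hin | hin
        · have := hcross _ hin _ hg0rest
          omega
        · exact hM'nin hin

theorem run_getD_add (R : List Int) (run : List Int) (hrun : run ∈ runsOf R)
    (i k : Nat) (h : i + k < run.length) :
    run.getD (i + k) 0 = run.getD i 0 + (k : Int) := by
  rw [runsOf_consec R run hrun (i + k) h, runsOf_consec R run hrun i (by omega)]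
  push_cast; ring

theorem run_window (R : List Int) (hpw : R.Pairwise (· < ·)) (run : List Int)
    (hrun : run ∈ runsOf R) (j : Nat) (hj : j < run.length) (K : Nat)
    (hall : ∀ k : Nat, k ≤ K → run.getD j 0 + (k : Int) ∈ R) : j + K < run.length := by
  by_contra hcon
  have hm : run.length - j ≤ K := by omega
  have h1 : run.getD j 0 + ((run.length - j : Nat) : Int) = run.getD 0 0 + run.length := by
    rw [runsOf_consec R run hrun j hj]
    have : ((run.length - j : Nat) : Int) = (run.length : Int) - j := by omega
    omega
  have := hall (run.length - j) hm
  rw [h1] at this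
  exact runsOf_max R hpw run hrun this

theorem mem_runs_starts (R : List Int) (hpw : R.Pairwise (· < ·)) (w : Nat) (s : Int) :
    s ∈ (runsOf R).flatMap (fun run => (List.range (run.length - w)).map (fun i => run.getD i 0))
      ↔ (∀ k : Nat, k ≤ w → s + (k : Int) ∈ R) := by
  constructor
  · intro h
    obtain ⟨run, hrun, hs⟩ := List.mem_flatMap.mp h
    obtain ⟨i, hi, rfl⟩ := List.mem_map.mp hs
    have hi' : i < run.length - w := List.mem_range.mp hi
    intro k hk
    rw [← run_getD_add R run hrun i k (by omega)]
    exact runsOf_subset R run hrun _ (mem_getD _ _ (by omega))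
  · intro hall
    have hs : s ∈ R := by simpa using hall 0 (by omega)
    rw [← flatten_runsOf R] at hs
    obtain ⟨run, hrun, hsr⟩ := List.mem_flatten.mp hs
    obtain ⟨j, hj, hjx⟩ := idx_of_mem hsr
    have hwin := run_window R hpw run hrun j hj w (by rw [hjx]; exact hall)
    exact List.mem_flatMap.mpr ⟨run, hrun,
      List.mem_map.mpr ⟨j, List.mem_range.mpr (by omega), hjx⟩⟩

theorem map_getD_range (l : List Int) : (List.range l.length).map (fun i => l.getD i 0) = l := by
  apply List.ext_getElem
  · simp
  · intro i h1 h2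
    simp only [List.getElem_map, List.getElem_range]
    rw [List.getD_eq_getElem l 0 h2]

theorem flatMap_sublist_flatten (L : List (List Int)) (f : List Int → List Int)
    (h : ∀ l ∈ L, List.Sublist (f l) l) : List.Sublist (L.flatMap f) L.flatten := by
  induction L with
  | nil => simp
  | cons a L ih =>
    rw [List.flatMap_cons, List.flatten_cons]
    exact List.Sublist.append (h a List.mem_cons_self)
      (ih (fun l hl => h l (List.mem_cons_of_mem a hl)))

theorem starts_sublist (R : List Int) (f : List Int → List Int)
    (hf : ∀ run ∈ runsOf R, List.Sublist (f run) run) : List.Sublist ((runsOf R).flatMap f) R := by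
  have := flatMap_sublist_flatten (runsOf R) f hf
  rwa [flatten_runsOf R] at this


-- ---- start-rank views of the four window scans ----

/-- First cards of the five consecutive ranks from `s`. -/
def Fs (hand : List Int) (s : Int) : List Int :=
  (PySem.List.pyRange 0 5 1).map (fun k => PySem.List.pyGetD ((rcD hand).getD (s + k) []) 0 0)

/-- First two cards of ranks `s` and `s+1`. -/
def Fd (hand : List Int) (s : Int) : List Int :=
  PySem.List.slice ((rcD hand).getD s []) none (some 2)
    ++ PySem.List.slice ((rcD hand).getD (s + 1) []) none (some 2)

def startsA (hand : List Int) : List Int :=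
  ((List.range ((ranksD hand).length - 4)).filter
      (fun i : Nat => PySem.List.pyGetD (ranksD hand) ((i : Int) + 4) 0 - PySem.List.pyGetD (ranksD hand) (i : Int) 0 == 4)).map
    (fun i : Nat => (ranksD hand).getD i 0)

def startsB (hand : List Int) : List Int :=
  (runsOf (ranksD hand)).flatMap (fun run => (List.range (run.length - 4)).map (fun i => run.getD i 0))

def dstartsA (hand : List Int) : List Int :=
  ((List.range ((ranksD hand).length - 1)).filter
      (fun i : Nat => PySem.List.pyGetD (ranksD hand) ((i : Int) + 1) 0 - PySem.List.pyGetD (ranksD hand) (i : Int) 0 == 1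
        && decide (2 ≤ ((rcD hand).getD (PySem.List.pyGetD (ranksD hand) (i : Int) 0) []).length)
        && decide (2 ≤ ((rcD hand).getD (PySem.List.pyGetD (ranksD hand) ((i : Int) + 1) 0) []).length))).map
    (fun i : Nat => (ranksD hand).getD i 0)

def dstartsB (hand : List Int) : List Int :=
  (runsOf (ranksD hand)).flatMap (fun run =>
    ((List.range (run.length - 1)).filter (fun i =>
        decide (2 ≤ ((rcD hand).getD (run.getD i 0) []).length)
        && decide (2 ≤ ((rcD hand).getD (run.getD i 0 + 1) []).length))).map
      (fun i => run.getD i 0))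

theorem portB_eq (hand : List Int) :
    find_combos_in_hand_alt hand =
      [("single", (rcD hand).items.map (fun p => [PySem.List.pyGetD p.2 0 0])),
       ("pair", ((rcD hand).items.filter (fun p => decide (2 ≤ p.2.length))).map (fun p => PySem.List.slice p.2 none (some 2))),
       ("triple", ((rcD hand).items.filter (fun p => decide (3 ≤ p.2.length))).map (fun p => PySem.List.slice p.2 none (some 3))),
       ("four_kind", ((rcD hand).items.filter (fun p => decide (4 ≤ p.2.length))).map (fun p => PySem.List.slice p.2 none (some 4))),
       ("straight", (runsOf (ranksD hand)).flatMap (fun run =>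
          (PySem.List.pyRange 0 ((run.length : Int) - 4) 1).map (fun i =>
            (PySem.List.pyRange 0 5 1).map (fun k =>
              PySem.List.pyGetD ((rcD hand).getD (PySem.List.pyGetD run (i + k) 0) []) 0 0)))),
       ("double_seq", (runsOf (ranksD hand)).flatMap (fun run =>
          ((PySem.List.pyRange 0 ((run.length : Int) - 1) 1).filter (fun i =>
              decide (2 ≤ ((rcD hand).getD (PySem.List.pyGetD run i 0) []).length)
              && decide (2 ≤ ((rcD hand).getD (PySem.List.pyGetD run (i + 1) 0) []).length))).map (fun i =>
            PySem.List.slice ((rcD hand).getD (PySem.List.pyGetD run i 0) []) none (some 2)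
            ++ PySem.List.slice ((rcD hand).getD (PySem.List.pyGetD run (i + 1) 0) []) none (some 2))))] := by
  simp only [find_combos_in_hand_alt]
  rw [ofList_groupB, groupB_items]
  rfl

theorem items_filter_one (hand : List Int) :
    (rcD hand).items.filter (fun p => decide (1 ≤ p.2.length)) = (rcD hand).items := by
  apply List.filter_eq_self.mpr
  intro p hp
  rw [PySem.Dict.items_eq_map_keys _ (rcD_nodup hand) []] at hp
  obtain ⟨k, hk, rfl⟩ := List.mem_map.mp hp
  have hne : (rcD hand).getD k [] ≠ [] := (rcD_getD_ne_nil_iff hand k).mpr hk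
  simpa [Nat.one_le_iff_ne_zero, List.length_eq_zero_iff] using hne

theorem toNat_sub4 (hand : List Int) : (((ranksD hand).length : Int) - 4).toNat = (ranksD hand).length - 4 := by omega
theorem toNat_sub1 (hand : List Int) : (((ranksD hand).length : Int) - 1).toNat = (ranksD hand).length - 1 := by omega

theorem straightA (hand : List Int) :
    ((PySem.List.pyRange 0 (((ranksD hand).length : Int) - 4) 1).filter
        (fun i => PySem.List.pyGetD (ranksD hand) (i + 4) 0 - PySem.List.pyGetD (ranksD hand) i 0 == 4)).map
      (fun i => (PySem.List.slice (ranksD hand) (some i) (some (i + 5))).foldl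
          (fun acc rank => acc ++ [PySem.List.pyGetD ((rcD hand).getD rank []) 0 0]) [])
    = (startsA hand).map (Fs hand) := by
  have hinc := ranksD_pairwise hand
  rw [range_cast_eq, toNat_sub4, List.filter_map, List.map_map, startsA, List.map_map]
  apply List.map_congr_left
  intro i hi
  have hi1 : i < (ranksD hand).length - 4 := List.mem_range.mp (List.mem_of_mem_filter hi)
  have hi2 := (List.mem_filter.mp hi).2
  simp only [Function.comp_apply, pyGetD_cast, pyGetD_cast4, beq_iff_eq] at hi2 ⊢
  have hc : (ranksD hand).getD (i + 4) 0 = (ranksD hand).getD i 0 + (4 : Int) := by omega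
  have hwin := window_all (ranksD hand) hinc (show i + 4 < (ranksD hand).length by omega)
    (by exact_mod_cast hc)
  have hslice : PySem.List.slice (ranksD hand) (some (i : Int)) (some ((i : Int) + 5))
      = [(ranksD hand).getD i 0, (ranksD hand).getD i 0 + 1, (ranksD hand).getD i 0 + 2,
         (ranksD hand).getD i 0 + 3, (ranksD hand).getD i 0 + 4] := by
    rw [show ((i : Int) + 5) = ((i : Int) + ((5 : Nat) : Int)) by norm_num,
      PySem.List.slice_natCast_add]
    apply List.ext_getElem
    · simp; omega
    · intro k hk1 hk2
      have hk5 : k < 5 := by simpa using hk2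
      have hidx : i + k < (ranksD hand).length := by omega
      have hL : (((ranksD hand).drop i).take 5)[k]'hk1 = (ranksD hand)[i + k]'hidx := by
        simp [List.getElem_take, List.getElem_drop]
      have hwin' : (ranksD hand)[i + k]'hidx = (ranksD hand).getD i 0 + (k : Int) := by
        rw [← List.getD_eq_getElem _ 0 hidx]; exact hwin k (by omega)
      rw [hL, hwin']
      interval_cases k <;> push_cast <;> simp
  rw [hslice, PySem.List.foldl_append_singleton_eq_map]
  simp [Fs, pyRange05, List.map_cons]

theorem mem_startsA (hand : List Int) (s : Int) :
    s ∈ startsA hand ↔ (∀ k : Nat, k ≤ 4 → s + (k : Int) ∈ ranksD hand) := by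
  have hinc := ranksD_pairwise hand
  rw [startsA]
  simp only [List.mem_map, List.mem_filter, List.mem_range, pyGetD_cast, pyGetD_cast4, beq_iff_eq]
  constructor
  · rintro ⟨i, ⟨hi, hcond⟩, rfl⟩
    have hlen : i + 4 < (ranksD hand).length := by omega
    have hc : (ranksD hand).getD (i + 4) 0 = (ranksD hand).getD i 0 + 4 := by omega
    have hwin := window_all (ranksD hand) hinc hlen (by exact_mod_cast hc)
    intro k hk
    rw [← hwin k hk]
    exact mem_getD _ _ (by omega)
  · intro hall
    obtain ⟨i, hiw, hs, hsw⟩ := exists_window (ranksD hand) hinc 4 s hall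
    refine ⟨i, ⟨by omega, by rw [hsw, hs]; push_cast; ring⟩, hs⟩

theorem pairwise_startsA (hand : List Int) : (startsA hand).Pairwise (· < ·) := by
  have hinc := ranksD_pairwise hand
  rw [startsA, List.pairwise_map]
  have hpwf := List.Pairwise.sublist (List.filter_sublist
    (l := List.range ((ranksD hand).length - 4))
    (p := fun i : Nat => PySem.List.pyGetD (ranksD hand) ((i : Int) + 4) 0 - PySem.List.pyGetD (ranksD hand) (i : Int) 0 == 4))
    List.pairwise_lt_range
  refine List.Pairwise.imp_of_mem ?_ hpwf
  intro a b _ hb hab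
  have hb' : b < (ranksD hand).length - 4 := List.mem_range.mp (List.mem_of_mem_filter hb)
  exact mono_getD_lt _ hinc hab (by omega)

theorem pyGetD_run_add (R run : List Int) (hrun : run ∈ runsOf R) (i c : Nat) (h : i + c < run.length) :
    PySem.List.pyGetD run ((i : Int) + (c : Int)) 0 = run.getD i 0 + (c : Int) := by
  rw [show ((i : Int) + (c : Int)) = ((i + c : Nat) : Int) by push_cast; ring,
    PySem.List.pyGetD_natCast, run_getD_add R run hrun i c h]

theorem straightB (hand : List Int) :
    (runsOf (ranksD hand)).flatMap (fun run =>
      (PySem.List.pyRange 0 ((run.length : Int) - 4) 1).map (fun i =>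
        (PySem.List.pyRange 0 5 1).map (fun k =>
          PySem.List.pyGetD ((rcD hand).getD (PySem.List.pyGetD run (i + k) 0) []) 0 0)))
    = (startsB hand).map (Fs hand) := by
  rw [startsB, List.flatMap_def, List.flatMap_def, List.map_flatten, List.map_map]
  congr 1
  apply List.map_congr_left
  intro run hrun
  simp only [Function.comp_apply]
  rw [pyRange05, range_cast_eq, show ((run.length : Int) - 4).toNat = run.length - 4 by omega,
    List.map_map, List.map_map]
  apply List.map_congr_left
  intro i hi
  have hi' : i < run.length - 4 := List.mem_range.mp hi
  simp only [Function.comp_apply, Fs]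
  rw [pyRange05]
  apply List.map_congr_left
  intro k hk
  have hgen : ∀ c : Nat, c ≤ 4 → (k : Int) = (c : Int) →
      PySem.List.pyGetD ((rcD hand).getD (PySem.List.pyGetD run ((i : Int) + k) 0) []) 0 0
        = PySem.List.pyGetD ((rcD hand).getD (run.getD i 0 + k) []) 0 0 := by
    intro c hc hkc
    rw [hkc, pyGetD_run_add (ranksD hand) run hrun i c (by omega)]
  fin_cases hk
  · exact hgen 0 (by omega) (by norm_num)
  · exact hgen 1 (by omega) (by norm_num)
  · exact hgen 2 (by omega) (by norm_num)
  · exact hgen 3 (by omega) (by norm_num)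
  · exact hgen 4 (by omega) (by norm_num)

theorem mem_startsB (hand : List Int) (s : Int) :
    s ∈ startsB hand ↔ (∀ k : Nat, k ≤ 4 → s + (k : Int) ∈ ranksD hand) :=
  mem_runs_starts (ranksD hand) (ranksD_pairwise hand) 4 s

theorem pairwise_startsB (hand : List Int) : (startsB hand).Pairwise (· < ·) := by
  refine List.Pairwise.sublist ?_ (ranksD_pairwise hand)
  rw [startsB]
  apply starts_sublist
  intro run _
  have h1 : List.Sublist ((List.range (run.length - 4)).map (fun i => run.getD i 0))
      ((List.range run.length).map (fun i => run.getD i 0)) :=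
    List.Sublist.map _ (List.range_sublist.mpr (by omega))
  rwa [map_getD_range run] at h1

theorem startsAB (hand : List Int) : startsA hand = startsB hand :=
  mono_eq_of_mem _ _ (pairwise_startsA hand) (pairwise_startsB hand)
    (fun s => by rw [mem_startsA, mem_startsB])

theorem doubleA (hand : List Int) :
    ((PySem.List.pyRange 0 (((ranksD hand).length : Int) - 1) 1).filter
        (fun i => PySem.List.pyGetD (ranksD hand) (i + 1) 0 - PySem.List.pyGetD (ranksD hand) i 0 == 1
          && decide (2 ≤ ((rcD hand).getD (PySem.List.pyGetD (ranksD hand) i 0) []).length)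
          && decide (2 ≤ ((rcD hand).getD (PySem.List.pyGetD (ranksD hand) (i + 1) 0) []).length))).map
      (fun i => PySem.List.slice ((rcD hand).getD (PySem.List.pyGetD (ranksD hand) i 0) []) none (some 2)
        ++ PySem.List.slice ((rcD hand).getD (PySem.List.pyGetD (ranksD hand) (i + 1) 0) []) none (some 2))
    = (dstartsA hand).map (Fd hand) := by
  rw [range_cast_eq, toNat_sub1, List.filter_map, List.map_map, dstartsA, List.map_map]
  apply List.map_congr_left
  intro i hi
  have hi2 := (List.mem_filter.mp hi).2
  simp only [Function.comp_apply, pyGetD_cast, pyGetD_cast1, beq_iff_eq, Bool.and_eq_true,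
    decide_eq_true_eq] at hi2 ⊢
  obtain ⟨⟨heq, _⟩, _⟩ := hi2
  have hc : (ranksD hand).getD (i + 1) 0 = (ranksD hand).getD i 0 + 1 := by omega
  rw [Fd, hc]

theorem mem_dstartsA (hand : List Int) (s : Int) :
    s ∈ dstartsA hand ↔ (2 ≤ ((rcD hand).getD s []).length ∧ 2 ≤ ((rcD hand).getD (s + 1) []).length) := by
  have hinc := ranksD_pairwise hand
  rw [dstartsA]
  simp only [List.mem_map, List.mem_filter, List.mem_range, pyGetD_cast, pyGetD_cast1,
    beq_iff_eq, Bool.and_eq_true, decide_eq_true_eq]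
  constructor
  · rintro ⟨i, ⟨hi, ⟨heq, hc1⟩, hc2⟩, rfl⟩
    have hs1 : (ranksD hand).getD (i + 1) 0 = (ranksD hand).getD i 0 + 1 := by omega
    rw [hs1] at hc2
    exact ⟨hc1, hc2⟩
  · rintro ⟨hc1, hc2⟩
    have hx0 : s ∈ ranksD hand := (mem_ranksD hand s).mpr (mem_keys_of_count2 hand s hc1)
    have hx1 : s + 1 ∈ ranksD hand := (mem_ranksD hand (s + 1)).mpr (mem_keys_of_count2 hand (s + 1) hc2)
    have hall : ∀ k : Nat, k ≤ 1 → s + (k : Int) ∈ ranksD hand := by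
      intro k hk
      interval_cases k
      · simpa using hx0
      · exact_mod_cast hx1
    obtain ⟨i, hiw, hs, hsw⟩ := exists_window (ranksD hand) hinc 1 s hall
    have hsw' : (ranksD hand).getD (i + 1) 0 = s + 1 := by exact_mod_cast hsw
    exact ⟨i, ⟨by omega, ⟨by omega, by rw [hs]; exact hc1⟩, by rw [hsw']; exact hc2⟩, hs⟩

theorem pairwise_dstartsA (hand : List Int) : (dstartsA hand).Pairwise (· < ·) := by
  have hinc := ranksD_pairwise hand
  rw [dstartsA, List.pairwise_map]
  have hpwf := List.Pairwise.sublist (List.filter_sublist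
    (l := List.range ((ranksD hand).length - 1))
    (p := fun i : Nat => PySem.List.pyGetD (ranksD hand) ((i : Int) + 1) 0 - PySem.List.pyGetD (ranksD hand) (i : Int) 0 == 1
        && decide (2 ≤ ((rcD hand).getD (PySem.List.pyGetD (ranksD hand) (i : Int) 0) []).length)
        && decide (2 ≤ ((rcD hand).getD (PySem.List.pyGetD (ranksD hand) ((i : Int) + 1) 0) []).length)))
    List.pairwise_lt_range
  refine List.Pairwise.imp_of_mem ?_ hpwf
  intro a b _ hb hab
  have hb' : b < (ranksD hand).length - 1 := List.mem_range.mp (List.mem_of_mem_filter hb)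
  exact mono_getD_lt _ hinc hab (by omega)

theorem doubleB (hand : List Int) :
    (runsOf (ranksD hand)).flatMap (fun run =>
      ((PySem.List.pyRange 0 ((run.length : Int) - 1) 1).filter (fun i =>
          decide (2 ≤ ((rcD hand).getD (PySem.List.pyGetD run i 0) []).length)
          && decide (2 ≤ ((rcD hand).getD (PySem.List.pyGetD run (i + 1) 0) []).length))).map (fun i =>
        PySem.List.slice ((rcD hand).getD (PySem.List.pyGetD run i 0) []) none (some 2)
        ++ PySem.List.slice ((rcD hand).getD (PySem.List.pyGetD run (i + 1) 0) []) none (some 2)))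
    = (dstartsB hand).map (Fd hand) := by
  rw [dstartsB, List.flatMap_def, List.flatMap_def, List.map_flatten, List.map_map]
  congr 1
  apply List.map_congr_left
  intro run hrun
  simp only [Function.comp_apply]
  rw [range_cast_eq, show ((run.length : Int) - 1).toNat = run.length - 1 by omega,
    List.filter_map, List.map_map, List.map_map]
  have hfc : ∀ i ∈ List.range (run.length - 1),
      ((fun j : Int => decide (2 ≤ ((rcD hand).getD (PySem.List.pyGetD run j 0) []).length)
          && decide (2 ≤ ((rcD hand).getD (PySem.List.pyGetD run (j + 1) 0) []).length)) ∘ (fun i : Nat => (i : Int))) i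
      = (fun i : Nat => decide (2 ≤ ((rcD hand).getD (run.getD i 0) []).length)
          && decide (2 ≤ ((rcD hand).getD (run.getD i 0 + 1) []).length)) i := by
    intro i hi
    have hi' : i < run.length - 1 := List.mem_range.mp hi
    simp only [Function.comp_apply, pyGetD_cast]
    rw [show ((i : Int) + 1) = ((i : Int) + ((1 : Nat) : Int)) by norm_num,
      pyGetD_run_add (ranksD hand) run hrun i 1 (by omega)]
    norm_num
  rw [List.filter_congr hfc]
  apply List.map_congr_left
  intro i hif
  have hi' : i < run.length - 1 := List.mem_range.mp (List.mem_of_mem_filter hif)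
  simp only [Function.comp_apply, Fd, pyGetD_cast]
  rw [show ((i : Int) + 1) = ((i : Int) + ((1 : Nat) : Int)) by norm_num,
    pyGetD_run_add (ranksD hand) run hrun i 1 (by omega)]
  norm_num

theorem mem_dstartsB (hand : List Int) (s : Int) :
    s ∈ dstartsB hand ↔ (2 ≤ ((rcD hand).getD s []).length ∧ 2 ≤ ((rcD hand).getD (s + 1) []).length) := by
  have hpw := ranksD_pairwise hand
  rw [dstartsB]
  constructor
  · intro h
    obtain ⟨run, hrun, hs⟩ := List.mem_flatMap.mp h
    obtain ⟨i, hi, rfl⟩ := List.mem_map.mp hs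
    have hcond := (List.mem_filter.mp hi).2
    simp only [Bool.and_eq_true, decide_eq_true_eq] at hcond
    exact hcond
  · rintro ⟨hc1, hc2⟩
    have hx0 : s ∈ ranksD hand := (mem_ranksD hand s).mpr (mem_keys_of_count2 hand s hc1)
    have hx1 : s + 1 ∈ ranksD hand := (mem_ranksD hand (s + 1)).mpr (mem_keys_of_count2 hand (s + 1) hc2)
    rw [← flatten_runsOf (ranksD hand)] at hx0
    obtain ⟨run, hrun, hsr⟩ := List.mem_flatten.mp hx0
    obtain ⟨j, hj, hjx⟩ := idx_of_mem hsr
    have hall : ∀ k : Nat, k ≤ 1 → run.getD j 0 + (k : Int) ∈ ranksD hand := by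
      intro k hk
      interval_cases k
      · simpa using (hjx ▸ (runsOf_subset _ run hrun _ hsr) : run.getD j 0 ∈ ranksD hand)
      · rw [hjx]; exact_mod_cast hx1
    have hwin := run_window (ranksD hand) hpw run hrun j hj 1 hall
    refine List.mem_flatMap.mpr ⟨run, hrun, List.mem_map.mpr ⟨j, ?_, hjx⟩⟩
    refine List.mem_filter.mpr ⟨List.mem_range.mpr (by omega), ?_⟩
    simp only [Bool.and_eq_true, decide_eq_true_eq, hjx]
    exact ⟨hc1, hc2⟩

theorem pairwise_dstartsB (hand : List Int) : (dstartsB hand).Pairwise (· < ·) := by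
  refine List.Pairwise.sublist ?_ (ranksD_pairwise hand)
  rw [dstartsB]
  apply starts_sublist
  intro run _
  have h1 : List.Sublist
      (((List.range (run.length - 1)).filter (fun i =>
          decide (2 ≤ ((rcD hand).getD (run.getD i 0) []).length)
          && decide (2 ≤ ((rcD hand).getD (run.getD i 0 + 1) []).length))).map (fun i => run.getD i 0))
      ((List.range run.length).map (fun i => run.getD i 0)) :=
    List.Sublist.map _ (List.Sublist.trans List.filter_sublist (List.range_sublist.mpr (by omega)))
  rwa [map_getD_range run] at h1

theorem dstartsAB (hand : List Int) : dstartsA hand = dstartsB hand :=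
  mono_eq_of_mem _ _ (pairwise_dstartsA hand) (pairwise_dstartsB hand)
    (fun s => by rw [mem_dstartsA, mem_dstartsB])

-- ===== VERDICT (by name: the statement is the Claim_ definition above) =====
theorem find_combos_in_hand_spec : Claim_equal_find_combos_in_hand := by
  intro hand _
  show find_combos_in_hand hand = find_combos_in_hand_alt hand
  rw [portA_eq, mkSix_items, portB_eq, items_filter_one, straightA, doubleA,
    straightB, doubleB, startsAB, dstartsAB]
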